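-- pv_equiv track=rewrite | github.com/qn06142/coding-python | csphn_arrange.py | min_card_values
-- ===== SOURCE A (Python) =====
-- from collections import defaultdict
--
-- def min_card_values(n, cards):
--     card_groups = defaultdict(lambda: float('inf'))
--
--     for card in cards:
--         value, color = card
--         card_groups[color] = min(card_groups[color], value)
--
--     sorted_groups = sorted(card_groups.items())
--     min_values = [value for color, value in sorted_groups]
--
--     return len(sorted_groups), min_values
-- ===== SOURCE B (Python) =====
-- def min_card_values(n, cards):
--     # Sort once by (color, value); the first card of each color run then
--     # carries that color's minimum value, and colors appear in sorted order.
--     res = []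
--     prev = None
--     for value, color in sorted(cards, key=lambda c: (c[1], c[0])):
--         if color != prev:
--             res.append(value)
--             prev = color
--     return len(res), res
-- ===== Notes on version B (the rewrite author's own statement) =====
-- stated objective: alternative
-- what changed: Replaces the defaultdict-of-minima plus a sort of the dict items by a single sort of the cards by (color, value) followed by one linear scan that takes the first value of each color run.
import Mathlib
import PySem

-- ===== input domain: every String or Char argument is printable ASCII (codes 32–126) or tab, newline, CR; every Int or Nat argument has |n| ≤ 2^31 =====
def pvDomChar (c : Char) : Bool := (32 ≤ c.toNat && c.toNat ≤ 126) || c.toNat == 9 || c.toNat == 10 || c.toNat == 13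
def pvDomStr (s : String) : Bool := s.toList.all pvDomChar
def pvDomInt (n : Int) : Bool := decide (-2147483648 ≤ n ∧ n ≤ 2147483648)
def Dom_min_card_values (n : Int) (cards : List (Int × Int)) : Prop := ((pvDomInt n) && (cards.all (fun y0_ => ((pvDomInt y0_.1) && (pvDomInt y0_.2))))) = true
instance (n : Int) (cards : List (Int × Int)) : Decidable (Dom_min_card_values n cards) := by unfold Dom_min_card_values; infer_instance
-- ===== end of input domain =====

-- B replaces A's defaultdict-of-minima (plus a sort of the dict items) by one sort of the
-- cards by (color, value) and a single scan taking the first value of each color run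
-- (objective: alternative decomposition, same asymptotic cost).

-- ===== PORT A =====
-- Python: card_groups = defaultdict(lambda: float('inf')); card_groups[color] = min(card_groups[color], value).
-- The float('inf') default only ever feeds the first min, where min(inf, value) = value; ported exactly
-- as "absent key ↦ value, present key ↦ min old value" (the dict never holds inf after an assignment).
def min_card_values (n : Int) (cards : List (Int × Int)) : Int × List Int :=
  let card_groups : PySem.Dict Int Int :=
    cards.foldl (fun d card =>
      d.insert card.2 (match d.get? card.2 with
        | none => card.1
        | some old => min old card.1)) PySem.Dict.empty
  let sorted_groups := PySem.List.sorted2 card_groups.items (fun p => p.1) (fun p => p.2)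
  let min_values := sorted_groups.map (fun p => p.2)
  ((sorted_groups.length : Int), min_values)

-- ===== PORT B =====
def min_card_values_alt (n : Int) (cards : List (Int × Int)) : Int × List Int :=
  let s := PySem.List.sorted2 cards (fun c => c.2) (fun c => c.1)
  let st := s.foldl (fun (st : Option Int × List Int) vc =>
      if some vc.2 ≠ st.1 then (some vc.2, st.2 ++ [vc.1]) else st) (none, [])
  ((st.2.length : Int), st.2)

-- ===== PRECONDITION & SPEC =====
def Spec_min_card_values (n : Int) (cards : List (Int × Int)) (out : Int × List Int) : Prop := out = min_card_values_alt n cards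
instance (n : Int) (cards : List (Int × Int)) (out : Int × List Int) : Decidable (Spec_min_card_values n cards out) := by unfold Spec_min_card_values; infer_instance

-- ===== CLAIM (what is proved, stated in full; the proofs are below) =====
def Claim_equal_min_card_values : Prop := ∀ (n : Int) (cards : List (Int × Int)), Dom_min_card_values n cards → Spec_min_card_values n cards (min_card_values n cards)

-- ===== LEMMAS AND PROOFS =====

-- integers within the Dom bound
def pvBnd (x : Int) : Prop := -2147483648 ≤ x ∧ x ≤ 2147483648

-- lexicographic ≤ on a card (value, color), color first
def pvLexLe (a b : Int × Int) : Prop := a.2 < b.2 ∨ (a.2 = b.2 ∧ a.1 ≤ b.1)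

-- values of color c, in list order
def pvMvals (c : Int) (l : List (Int × Int)) : List Int :=
  (l.filter (fun x => x.2 == c)).map (fun x => x.1)

-- the minimum value of color c (0 if the color is absent; only used at present colors)
def pvVal (c : Int) (l : List (Int × Int)) : Int := (pvMvals c l).min?.getD 0

-- combine an optional old dict entry with an optional minimum
def pvOpm : Option Int → Option Int → Option Int
  | a, none => a
  | none, some m => some m
  | some x, some m => some (min x m)

-- one (color, value) pair per color run of a lexicographically sorted card list
def pvRuns : List (Int × Int) → List (Int × Int)
  | [] => []
  | x :: t => (x.2, x.1) :: pvRuns (t.filter (fun y => !(y.2 == x.2)))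
termination_by l => l.length
decreasing_by simpa using (List.length_filter_le _ _).trans (by simp)

theorem pv_insertBy_congr (b1 b2 : (Int × Int) → (Int × Int) → Bool) (x : Int × Int)
    (ys : List (Int × Int)) (h : ∀ y ∈ ys, b1 x y = b2 x y) :
    PySem.List.insertBy b1 x ys = PySem.List.insertBy b2 x ys := by
  induction ys with
  | nil => rfl
  | cons y t ih =>
    have hy := h y (by simp)
    simp only [PySem.List.insertBy, hy]
    split
    · rfl
    · simpa using ih (fun z hz => h z (by simp [hz]))

theorem pv_foldl_insertBy_congr (b1 b2 : (Int × Int) → (Int × Int) → Bool)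
    (xs : List (Int × Int)) :
    ∀ acc : List (Int × Int),
      (∀ x ∈ xs, ∀ y, (y ∈ acc ∨ y ∈ xs) → b1 x y = b2 x y) →
      xs.foldl (fun acc x => PySem.List.insertBy b1 x acc) acc
        = xs.foldl (fun acc x => PySem.List.insertBy b2 x acc) acc := by
  induction xs with
  | nil => intro acc _; rfl
  | cons x t ih =>
    intro acc h
    simp only [List.foldl_cons]
    rw [pv_insertBy_congr b1 b2 x acc (fun y hy => h x (by simp) y (Or.inl hy)), ih]
    intro z hz y hy
    apply h z (by simp [hz])
    rcases hy with hy | hy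
    · rcases (PySem.List.mem_insertBy _ _ _ _).1 hy with rfl | hy
      · exact Or.inr (by simp)
      · exact Or.inl hy
    · exact Or.inr (by simp [hy])

-- under the Dom bounds, sorting by the tuple key (k1, k2) is sorting by a single Int key
theorem pv_sorted2_eq_sorted (xs : List (Int × Int)) (k1 k2 : (Int × Int) → Int)
    (hb : ∀ x ∈ xs, pvBnd (k1 x) ∧ pvBnd (k2 x)) :
    PySem.List.sorted2 xs k1 k2
      = PySem.List.sorted xs (fun x => k1 x * 8589934592 + k2 x) := by
  rw [PySem.List.sorted_eq_foldl_insertBy]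
  show xs.foldl (fun acc x => PySem.List.insertBy _ x acc) [] = _
  apply pv_foldl_insertBy_congr
  intro x hx y hy
  rcases hy with hy | hy
  · simp at hy
  · obtain ⟨hx1, hx2⟩ := hb x hx
    obtain ⟨hy1, hy2⟩ := hb y hy
    have : (k1 x < k1 y ∨ (¬(k1 y < k1 x) ∧ k2 x < k2 y))
        ↔ (k1 x * 8589934592 + k2 x < k1 y * 8589934592 + k2 y) := by
      unfold pvBnd at hx1 hx2 hy1 hy2; omega
    simp only [← decide_not, ← Bool.decide_and, ← Bool.decide_or]
    exact decide_eq_decide.mpr this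

-- the dict built by A's loop, characterised by lookup
theorem pv_foldl_min_pull (l : List Int) :
    ∀ a b : Int, l.foldl min (min a b) = min a (l.foldl min b) := by
  induction l with
  | nil => intro a b; rfl
  | cons c t ih =>
    intro a b
    simp only [List.foldl_cons, min_assoc]
    exact ih a (min b c)

theorem pv_getA (l : List (Int × Int)) :
    ∀ (d : PySem.Dict Int Int) (c : Int),
      (l.foldl (fun d card =>
        d.insert card.2 (match d.get? card.2 with
          | none => card.1
          | some old => min old card.1)) d).get? c
      = pvOpm (d.get? c) (pvMvals c l).min? := by
  induction l with
  | nil => intro d c; cases h : d.get? c <;> simp [pvMvals, pvOpm, h]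
  | cons x t ih =>
    intro d c
    simp only [List.foldl_cons, ih]
    by_cases hc : x.2 = c
    · subst hc
      have hm : pvMvals x.2 (x :: t) = x.1 :: pvMvals x.2 t := by
        simp [pvMvals, List.filter_cons]
      rw [hm, PySem.Dict.get?_insert, if_pos rfl]
      rcases hmt : (pvMvals x.2 t).min? with _ | m
      · rcases (List.min?_eq_none_iff).1 hmt with hnil
        rw [hnil] at hm ⊢
        cases hd : d.get? x.2 <;> simp [pvOpm, hd, List.min?]
      · obtain ⟨v, tv, htv⟩ : ∃ v tv, pvMvals x.2 t = v :: tv := by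
          cases h' : pvMvals x.2 t with
          | nil => rw [h'] at hmt; simp [List.min?] at hmt
          | cons a b => exact ⟨a, b, rfl⟩
        rw [htv] at hmt
        simp only [List.min?, Option.some.injEq] at hmt
        rw [htv]
        simp only [List.min?, List.foldl_cons, pv_foldl_min_pull, hmt]
        cases hd : d.get? x.2 <;> simp [pvOpm, hd] <;> omega
    · have hm : pvMvals c (x :: t) = pvMvals c t := by
        simp [pvMvals, List.filter_cons, hc]
      rw [hm, PySem.Dict.get?_insert, if_neg (fun h => hc h.symm)]

-- A's dict items, closed form
theorem pv_itemsA (cards : List (Int × Int)) :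
    (cards.foldl (fun d card =>
        d.insert card.2 (match d.get? card.2 with
          | none => card.1
          | some old => min old card.1)) PySem.Dict.empty).items
      = (PySem.Set.ofList (cards.map (fun x => x.2))).map (fun c => (c, pvVal c cards)) := by
  set d := cards.foldl _ PySem.Dict.empty with hd
  have hkeys : d.keys = PySem.Set.ofList (cards.map (fun x => x.2)) := by
    rw [hd]
    have := PySem.Dict.keys_foldl_insert_key (ν := Int) cards (fun x => x.2)
      (fun d card => match d.get? card.2 with | none => card.1 | some old => min old card.1)
      PySem.Dict.empty
    simpa [PySem.Set.update_nil_left] using this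
  have hnodup : d.keys.Nodup := by
    rw [hd]
    exact PySem.Dict.nodup_keys_foldl_insert_key cards (fun x => x.2) _ _ (by simp)
  rw [PySem.Dict.items_eq_map_keys d hnodup 0, hkeys]
  apply List.map_congr_left
  intro c _
  have := pv_getA cards PySem.Dict.empty c
  rw [← hd] at this
  rw [PySem.Dict.getD_eq_get?_getD, this]
  cases h : (pvMvals c cards).min? <;> simp [pvOpm, pvVal, h]

-- Set.add of a present element is the identity
theorem pv_add_mem {s : List Int} {c : Int} (h : c ∈ s) : PySem.Set.add s c = s := by
  simp [PySem.Set.add, PySem.Set.contains, h]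

theorem pv_foldl_add_filter (c : Int) (cs : List Int) :
    ∀ s : List Int, c ∈ s →
      cs.foldl PySem.Set.add s = (cs.filter (fun x => !(x == c))).foldl PySem.Set.add s := by
  induction cs with
  | nil => intro s _; rfl
  | cons a t ih =>
    intro s hs
    by_cases ha : a = c
    · subst ha
      have h1 : List.filter (fun x => !(x == a)) (a :: t) = t.filter (fun x => !(x == a)) := by
        simp
      rw [h1, List.foldl_cons, pv_add_mem hs]
      exact ih s hs
    · have h1 : List.filter (fun x => !(x == c)) (a :: t) = a :: t.filter (fun x => !(x == c)) := by
        simp [ha]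
      rw [h1, List.foldl_cons, List.foldl_cons]
      apply ih
      by_cases hmem : a ∈ s
      · rw [pv_add_mem hmem]; exact hs
      · simp only [PySem.Set.add, PySem.Set.contains]
        split <;> simp [hs]

theorem pv_foldl_add_cons (c : Int) (ys : List Int) :
    ∀ s : List Int, c ∉ ys →
      ys.foldl PySem.Set.add (c :: s) = c :: ys.foldl PySem.Set.add s := by
  induction ys with
  | nil => intro s _; rfl
  | cons y t ih =>
    intro s hc
    have hyc : y ≠ c := fun h => hc (by simp [h])
    have hct : c ∉ t := fun h => hc (by simp [h])
    have hstep : PySem.Set.add (c :: s) y = c :: PySem.Set.add s y := by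
      by_cases hy : y ∈ s <;> simp [PySem.Set.add, PySem.Set.contains, hy, hyc]
    rw [List.foldl_cons, List.foldl_cons, hstep, ih _ hct]

theorem pv_ofList_cons (c : Int) (cs : List Int) :
    PySem.Set.ofList (c :: cs) = c :: PySem.Set.ofList (cs.filter (fun x => !(x == c))) := by
  show (c :: cs).foldl PySem.Set.add PySem.Set.empty = _
  simp only [List.foldl_cons]
  have h1 : PySem.Set.add PySem.Set.empty c = [c] := rfl
  rw [h1, pv_foldl_add_filter c cs [c] (by simp),
    show ([c] : List Int) = c :: ([] : List Int) from rfl,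
    pv_foldl_add_cons c _ _ (by simp)]
  rfl

-- every pair produced by pvRuns comes from the input (swapped)
theorem pv_runs_mem_aux : ∀ (N : Nat) (l : List (Int × Int)), l.length ≤ N →
    ∀ p ∈ pvRuns l, (p.2, p.1) ∈ l := by
  intro N
  induction N with
  | zero =>
    intro l hl
    have : l = [] := List.eq_nil_of_length_eq_zero (Nat.le_zero.1 hl)
    subst this
    simp [pvRuns]
  | succ N ih =>
    intro l hl p hp
    cases l with
    | nil => simp [pvRuns] at hp
    | cons x t =>
      rw [pvRuns] at hp
      rcases List.mem_cons.1 hp with rfl | hp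
      · simp
      · have := ih _ ((List.length_filter_le _ _).trans (by simpa using hl)) p hp
        exact List.mem_cons_of_mem _ (List.mem_of_mem_filter this)

theorem pv_runs_mem (l : List (Int × Int)) : ∀ p ∈ pvRuns l, (p.2, p.1) ∈ l :=
  pv_runs_mem_aux l.length l le_rfl

-- a fold of min over elements all ≥ v is v
theorem pv_foldl_min_of_le (m : List Int) :
    ∀ v : Int, (∀ w ∈ m, v ≤ w) → m.foldl min v = v := by
  induction m with
  | nil => intro v _; rfl
  | cons a t ih =>
    intro v h
    simp only [List.foldl_cons, min_eq_left (h a (by simp))]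
    exact ih v (fun w hw => h w (by simp [hw]))

theorem pv_min?_spec {l : List Int} {m : Int} (h : l.min? = some m) :
    m ∈ l ∧ ∀ y ∈ l, m ≤ y := by
  cases l with
  | nil => simp [List.min?] at h
  | cons a t =>
    simp only [List.min?, Option.some.injEq] at h
    subst h
    refine ⟨?_, ?_⟩
    · rcases PySem.List.foldl_min_mem t a with h | h
      · simp [h]
      · simp [h]
    · intro y hy
      rcases List.mem_cons.1 hy with rfl | hy
      · exact (PySem.List.foldl_min_le t y).1
      · exact (PySem.List.foldl_min_le t a).2 y hy

theorem pv_min?_perm {l l' : List Int} (h : l.Perm l') : l.min? = l'.min? := by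
  cases hl : l.min? with
  | none =>
    rw [List.min?_eq_none_iff] at hl
    subst hl
    simp [List.min?, h.symm.eq_nil]
  | some m =>
    cases hl' : l'.min? with
    | none =>
      rw [List.min?_eq_none_iff] at hl'
      subst hl'
      simp [h.eq_nil, List.min?] at hl
    | some m' =>
      obtain ⟨hm, hmin⟩ := pv_min?_spec hl
      obtain ⟨hm', hmin'⟩ := pv_min?_spec hl'
      have h1 := hmin m' (h.symm.mem_iff.1 hm')
      have h2 := hmin' m (h.mem_iff.1 hm)
      exact congrArg some (le_antisymm h1 h2)

theorem pv_map_filter (x2 : Int) (t : List (Int × Int)) :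
    (t.filter (fun y => !(y.2 == x2))).map (fun y => y.2)
      = (t.map (fun y => y.2)).filter (fun c => !(c == x2)) := by
  induction t with
  | nil => rfl
  | cons a u ihu =>
    simp only [List.filter_cons, List.map_cons]
    by_cases ha : a.2 = x2 <;> simp [ha, ihu]

-- pvRuns of a lexicographically sorted list is exactly "sorted distinct colors with their minima"
theorem pv_runs_eq_aux : ∀ (N : Nat) (l : List (Int × Int)), l.length ≤ N →
    l.Pairwise pvLexLe →
    pvRuns l = (PySem.Set.ofList (l.map (fun x => x.2))).map (fun c => (c, pvVal c l)) := by
  intro N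
  induction N with
  | zero =>
    intro l hl _
    have : l = [] := List.eq_nil_of_length_eq_zero (Nat.le_zero.1 hl)
    subst this
    simp [pvRuns]
  | succ N ih =>
    intro l hl h
    cases l with
    | nil => simp [pvRuns]
    | cons x t =>
      have hhead : ∀ y ∈ t, pvLexLe x y := (List.pairwise_cons.1 h).1
      have hpt' : (t.filter (fun y => !(y.2 == x.2))).Pairwise pvLexLe :=
        h.of_cons.sublist List.filter_sublist
      rw [pvRuns, ih _ ((List.length_filter_le _ _).trans (by simpa using hl)) hpt']
      have hmapf := pv_map_filter x.2 t
      have hcons : (x :: t).map (fun y => y.2) = x.2 :: t.map (fun y => y.2) := rfl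
      rw [hcons, pv_ofList_cons, List.map_cons, ← hmapf]
      congr 1
      · -- head: the first value of the run is the minimum of its color
        have hmv : pvMvals x.2 (x :: t) = x.1 :: pvMvals x.2 t := by
          simp [pvMvals, List.filter_cons]
        have hge : ∀ w ∈ pvMvals x.2 t, x.1 ≤ w := by
          intro w hw
          simp only [pvMvals, List.mem_map, List.mem_filter, beq_iff_eq] at hw
          obtain ⟨y, ⟨hyt, hyc⟩, rfl⟩ := hw
          rcases hhead y hyt with h1 | ⟨h1, h2⟩
          · omega
          · exact h2
        simp [pvVal, hmv, List.min?, pv_foldl_min_of_le _ _ hge]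
      · -- tail: minima of the other colors are unchanged by dropping color x.2
        apply List.map_congr_left
        intro c hc
        have hcne : c ≠ x.2 := by
          have h4 := (PySem.Set.mem_ofList _ _).1 hc
          simp only [List.mem_map, List.mem_filter, Bool.not_eq_true',
            beq_eq_false_iff_ne] at h4
          obtain ⟨y, ⟨_, hy2⟩, rfl⟩ := h4
          exact hy2
        have h1 : pvMvals c (t.filter (fun y => !(y.2 == x.2))) = pvMvals c t := by
          simp only [pvMvals, List.filter_filter]
          congr 1
          apply List.filter_congr
          intro y _
          by_cases hy : y.2 = c <;> simp [hy, hcne]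
        have h2 : pvMvals c (x :: t) = pvMvals c t := by
          simp [pvMvals, List.filter_cons, Ne.symm hcne]
        simp [pvVal, h1, h2]

theorem pv_runs_eq (l : List (Int × Int)) (h : l.Pairwise pvLexLe) :
    pvRuns l = (PySem.Set.ofList (l.map (fun x => x.2))).map (fun c => (c, pvVal c l)) :=
  pv_runs_eq_aux l.length l le_rfl h

-- pvRuns of a lexicographically sorted list has strictly increasing colors
theorem pv_runs_pairwise_aux : ∀ (N : Nat) (l : List (Int × Int)), l.length ≤ N →
    l.Pairwise pvLexLe → (pvRuns l).Pairwise (fun p q => p.1 < q.1) := by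
  intro N
  induction N with
  | zero =>
    intro l hl _
    have : l = [] := List.eq_nil_of_length_eq_zero (Nat.le_zero.1 hl)
    subst this
    simp [pvRuns]
  | succ N ih =>
    intro l hl h
    cases l with
    | nil => simp [pvRuns]
    | cons x t =>
      have hhead : ∀ y ∈ t, pvLexLe x y := (List.pairwise_cons.1 h).1
      have hpt' : (t.filter (fun y => !(y.2 == x.2))).Pairwise pvLexLe :=
        h.of_cons.sublist List.filter_sublist
      rw [pvRuns]
      refine List.pairwise_cons.2
        ⟨?_, ih _ ((List.length_filter_le _ _).trans (by simpa using hl)) hpt'⟩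
      intro q hq
      have hmem := pv_runs_mem _ q hq
      simp only [List.mem_filter, Bool.not_eq_true', beq_eq_false_iff_ne] at hmem
      rcases hhead _ hmem.1 with h1 | ⟨h1, _⟩
      · exact h1
      · exact absurd h1.symm hmem.2

theorem pv_runs_pairwise (l : List (Int × Int)) (h : l.Pairwise pvLexLe) :
    (pvRuns l).Pairwise (fun p q => p.1 < q.1) :=
  pv_runs_pairwise_aux l.length l le_rfl h

-- B's scan over a lexicographically sorted list collects the values of pvRuns
theorem pv_scan_some (t : List (Int × Int)) :
    ∀ (c : Int) (res : List Int), t.Pairwise pvLexLe → (∀ x ∈ t, c ≤ x.2) →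
      (t.foldl (fun (st : Option Int × List Int) vc =>
        if some vc.2 ≠ st.1 then (some vc.2, st.2 ++ [vc.1]) else st) (some c, res)).2
      = res ++ (pvRuns (t.filter (fun y => !(y.2 == c)))).map (fun p => p.2) := by
  induction t with
  | nil => intro c res _ _; simp [pvRuns]
  | cons x t ih =>
    intro c res hp hge
    have hpt : t.Pairwise pvLexLe := hp.of_cons
    have hhead : ∀ y ∈ t, pvLexLe x y := (List.pairwise_cons.1 hp).1
    by_cases hc : x.2 = c
    · have hfil : (x :: t).filter (fun y => !(y.2 == c)) = t.filter (fun y => !(y.2 == c)) := by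
        simp [List.filter_cons, hc]
      rw [hfil, List.foldl_cons, if_neg (by simp [hc])]
      exact ih c res hpt (fun y hy => hge y (List.mem_cons_of_mem _ hy))
    · have hlt : c < x.2 := lt_of_le_of_ne (hge x (by simp)) (Ne.symm hc)
      have hge' : ∀ y ∈ t, x.2 ≤ y.2 := by
        intro y hy
        rcases hhead y hy with h1 | ⟨h1, _⟩
        · exact le_of_lt h1
        · exact le_of_eq h1
      have hfid : t.filter (fun y => !(y.2 == c)) = t := by
        apply List.filter_eq_self.2
        intro y hy
        have h3 := hge' y hy
        simpa using (by omega : ¬ y.2 = c)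
      have hfil : (x :: t).filter (fun y => !(y.2 == c)) = x :: t := by
        simp [List.filter_cons, hc, hfid]
      rw [hfil, List.foldl_cons, if_pos (by simp [hc])]
      rw [ih x.2 (res ++ [x.1]) hpt hge', pvRuns]
      simp

theorem pv_scan (l : List (Int × Int)) (h : l.Pairwise pvLexLe) :
    (l.foldl (fun (st : Option Int × List Int) vc =>
        if some vc.2 ≠ st.1 then (some vc.2, st.2 ++ [vc.1]) else st) (none, [])).2
      = (pvRuns l).map (fun p => p.2) := by
  cases l with
  | nil => simp [pvRuns]
  | cons x t =>
    rw [List.foldl_cons, if_pos (by simp)]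
    have h0 : (((none : Option Int), ([] : List Int)).2 ++ [x.1]) = [x.1] := rfl
    have hge : ∀ y ∈ t, x.2 ≤ y.2 := by
      intro y hy
      rcases (List.pairwise_cons.1 h).1 y hy with h1 | ⟨h1, _⟩
      · exact le_of_lt h1
      · exact le_of_eq h1
    rw [show (((none : Option Int), ([] : List Int)).2 ++ [x.1]) = [x.1] from rfl,
      pv_scan_some t x.2 [x.1] h.of_cons hge, pvRuns]
    simp

-- the single-key encodings used for the two sorts
theorem pv_encC_le {a b : Int × Int} (ha1 : pvBnd a.1) (ha2 : pvBnd a.2)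
    (hb1 : pvBnd b.1) (hb2 : pvBnd b.2)
    (h : a.2 * 8589934592 + a.1 ≤ b.2 * 8589934592 + b.1) : pvLexLe a b := by
  unfold pvBnd at *; unfold pvLexLe
  omega

-- main equivalence
theorem pv_main (n : Int) (cards : List (Int × Int))
    (hb : ∀ x ∈ cards, pvBnd x.1 ∧ pvBnd x.2) :
    min_card_values n cards = min_card_values_alt n cards := by
  -- the sorted card list both sides revolve around
  set s := PySem.List.sorted cards (fun x => x.2 * 8589934592 + x.1) with hs
  have hsperm : s.Perm cards := PySem.List.sorted_perm _ _ _
  have hsmem : ∀ x ∈ s, pvBnd x.1 ∧ pvBnd x.2 := fun x hx => hb x (hsperm.mem_iff.1 hx)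
  have hspw : s.Pairwise pvLexLe := by
    refine (PySem.List.sorted_pairwise cards (fun x => x.2 * 8589934592 + x.1)).imp_of_mem ?_
    intro a b ha hb'
    exact pv_encC_le (hsmem a ha).1 (hsmem a ha).2 (hsmem b hb').1 (hsmem b hb').2
  -- B's side
  have hBsort : PySem.List.sorted2 cards (fun c => c.2) (fun c => c.1) = s := by
    rw [hs]
    exact pv_sorted2_eq_sorted cards _ _ (fun x hx => ⟨(hb x hx).2, (hb x hx).1⟩)
  have hB : min_card_values_alt n cards
      = ((((pvRuns s).map (fun p => p.2)).length : Int), (pvRuns s).map (fun p => p.2)) := by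
    show ((_ : Int), _) = _
    rw [hBsort, pv_scan s hspw]
  -- A's side
  have hval : ∀ c, pvVal c s = pvVal c cards := by
    intro c
    have hp : (pvMvals c s).Perm (pvMvals c cards) := (hsperm.filter _).map _
    unfold pvVal
    rw [pv_min?_perm hp]
  have hitems := pv_itemsA cards
  set items := (cards.foldl (fun d card =>
      d.insert card.2 (match d.get? card.2 with
        | none => card.1
        | some old => min old card.1)) PySem.Dict.empty).items with hitemsdef
  -- pvRuns s is a permutation of the dict items
  have hrunseq := pv_runs_eq s hspw
  have hcolperm : (PySem.Set.ofList (s.map (fun x => x.2))).Perm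
      (PySem.Set.ofList (cards.map (fun x => x.2))) := by
    apply (List.perm_ext_iff_of_nodup (PySem.Set.nodup_ofList _) (PySem.Set.nodup_ofList _)).2
    intro c
    simp only [PySem.Set.mem_ofList]
    exact (hsperm.map (fun x => x.2)).mem_iff
  have hperm : (pvRuns s).Perm items := by
    rw [hrunseq, hitems]
    have : (PySem.Set.ofList (s.map (fun x => x.2))).map (fun c => (c, pvVal c s))
        = (PySem.Set.ofList (s.map (fun x => x.2))).map (fun c => (c, pvVal c cards)) :=
      List.map_congr_left (fun c _ => by rw [hval c])
    rw [this]
    exact hcolperm.map _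
  -- bounds on the items / runs entries
  have hrunsbnd : ∀ p ∈ pvRuns s, pvBnd p.1 ∧ pvBnd p.2 := by
    intro p hp
    have := pv_runs_mem s p hp
    exact ⟨(hsmem _ this).2, (hsmem _ this).1⟩
  have hitemsbnd : ∀ p ∈ items, pvBnd p.1 ∧ pvBnd p.2 := by
    intro p hp
    exact hrunsbnd p (hperm.mem_iff.2 hp)
  -- A's sorted dict items are exactly pvRuns s
  have hAsort : PySem.List.sorted2 items (fun p => p.1) (fun p => p.2) = pvRuns s := by
    rw [pv_sorted2_eq_sorted items _ _ hitemsbnd]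
    apply PySem.List.sorted_eq_of_perm_of_pairwise_lt items (pvRuns s)
      (fun p => p.1 * 8589934592 + p.2) hperm
    refine (pv_runs_pairwise s hspw).imp_of_mem ?_
    intro a b ha hb' h1
    obtain ⟨ha1, ha2⟩ := hrunsbnd a ha
    obtain ⟨hb1, hb2⟩ := hrunsbnd b hb'
    unfold pvBnd at *
    omega
  have hA : min_card_values n cards
      = (((pvRuns s).length : Int), (pvRuns s).map (fun p => p.2)) := by
    show ((_ : Int), _) = _
    rw [hAsort]
  rw [hA, hB, List.length_map]

-- ===== VERDICT (by name: the statement is the Claim_ definition above) =====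
theorem min_card_values_spec : Claim_equal_min_card_values := by
  intro n cards hdom
  unfold Spec_min_card_values
  apply pv_main n cards
  intro x hx
  unfold Dom_min_card_values at hdom
  simp only [Bool.and_eq_true, List.all_eq_true] at hdom
  have := hdom.2 x hx
  simp only [pvDomInt, Bool.and_eq_true, decide_eq_true_eq] at this
  exact ⟨this.1, this.2⟩
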